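-- pv_equiv track=rewrite | github.com/shirleytxu/WFC-CSP | closestStringProblem.py | calculateLetterFreq
-- ===== SOURCE A (Python) =====
-- def calculateLetterFreq(inputStrings, alphabet):
--     """
--     :param inputStrings:  list of input strings, all strings ar of  the same length
--     :param alphabet: alphabet used to create the input strings
--     """
--
--     # find string length from the first string
--     stringLength = len(inputStrings[0])
--
--     # letter frequency table is a 2-D array implemented as list of list
--     letterFreqTable = {}
--     letterPositionTable = {}
--     for position in range(stringLength):
--         # create frequency for all alphabet letter at this position
--         alphabetFreqTable = {}
--         alphabetIndexTable = {}
--         for alphabetLetter in alphabet: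
--             alphabetFreqTable[alphabetLetter] = 0
--             alphabetIndexTable[alphabetLetter] = []
--             for index in range(len(inputStrings)):
--                 if inputStrings[index][position] == alphabetLetter:
--                     alphabetFreqTable[alphabetLetter] += 1
--                     alphabetIndexTable[alphabetLetter].append(index)
--         letterFreqTable[position] = alphabetFreqTable
--         letterPositionTable[position] = alphabetIndexTable
--     return letterFreqTable, letterPositionTable
-- ===== SOURCE B (Python) =====
-- def calculateLetterFreq(inputStrings, alphabet):
--     def column(p):
--         # one pass over the strings: group string indices by the letter at position p
--         groups = {c: [] for c in alphabet}
--         for i, s in enumerate(inputStrings):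
--             ch = s[p]
--             if ch in groups:
--                 groups[ch].append(i)
--         return groups
--     letterPositionTable = {p: column(p) for p in range(len(inputStrings[0]))}
--     letterFreqTable = {p: {c: len(ix) for c, ix in g.items()}
--                        for p, g in letterPositionTable.items()}
--     return letterFreqTable, letterPositionTable
-- ===== Notes on version B (the rewrite author's own statement) =====
-- stated objective: faster
-- what changed: B keeps a single grouping table per position (string indices grouped by letter in one pass over the strings) and derives the frequency table afterwards as the lengths of the index lists, instead of A's per-letter rescan of all strings maintaining two tables.
-- outside the precondition, e.g. on calculateLetterFreq(['b', ''], ''): A returns ({0: {}}, {0: {}}), B raises IndexError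
import Mathlib
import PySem

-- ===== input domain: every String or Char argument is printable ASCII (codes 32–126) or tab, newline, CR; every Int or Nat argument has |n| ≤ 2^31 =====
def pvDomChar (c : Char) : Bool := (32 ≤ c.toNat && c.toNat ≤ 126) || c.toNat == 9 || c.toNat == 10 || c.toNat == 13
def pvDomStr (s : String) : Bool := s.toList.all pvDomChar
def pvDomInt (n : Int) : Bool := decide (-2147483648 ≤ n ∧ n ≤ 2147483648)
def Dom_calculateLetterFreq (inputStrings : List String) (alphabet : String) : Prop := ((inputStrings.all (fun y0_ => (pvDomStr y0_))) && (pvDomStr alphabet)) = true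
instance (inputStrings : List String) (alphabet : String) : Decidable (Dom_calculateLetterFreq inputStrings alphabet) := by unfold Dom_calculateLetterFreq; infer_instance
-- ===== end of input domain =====

-- B keeps one grouping table per position (indices grouped by letter in a single pass over the
-- strings) and derives the frequency table as the lengths of those index lists afterwards
-- (objective: faster, O(L*A*N) → O(L*(A+N))).

-- ===== PORT A =====
-- dicts are PySem.Dict built in A's order; the returned tables are their items lists
def calculateLetterFreq (inputStrings : List String) (alphabet : String) : (List (Int × List (String × Int))) × (List (Int × List (String × List Int))) :=
  let stringLength : Int := PySem.Str.len (PySem.List.pyGetD inputStrings 0 "")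
  let tbls :=
    (PySem.List.pyRange 0 stringLength 1).foldl
      (fun (tbl : PySem.Dict Int (PySem.Dict String Int) × PySem.Dict Int (PySem.Dict String (List Int))) position =>
        let inner :=
          alphabet.toList.foldl
            (fun (t : PySem.Dict String Int × PySem.Dict String (List Int)) c =>
              (PySem.List.pyRange 0 (PySem.List.len inputStrings) 1).foldl
                (fun (t : PySem.Dict String Int × PySem.Dict String (List Int)) j =>
                  if PySem.List.pyGetD (PySem.List.pyGetD inputStrings j "").toList position ' ' == c then
                    (t.1.modify (String.singleton c) 0 (· + 1), t.2.modify (String.singleton c) [] (· ++ [j]))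
                  else t)
                (t.1.insert (String.singleton c) 0, t.2.insert (String.singleton c) []))
            (PySem.Dict.empty, PySem.Dict.empty)
        (tbl.1.insert position inner.1, tbl.2.insert position inner.2))
      (PySem.Dict.empty, PySem.Dict.empty)
  (tbls.1.items.map (fun q => (q.1, q.2.items)), tbls.2.items.map (fun q => (q.1, q.2.items)))

-- ===== PORT B =====
-- dict comprehensions over keys that are distinct (dict items / range) are ported as
-- PySem.Dict.mk of the mapped items list, which is exact there (insertion = append for fresh keys)
def calculateLetterFreq_alt (inputStrings : List String) (alphabet : String) : (List (Int × List (String × Int))) × (List (Int × List (String × List Int))) :=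
  let column : Int → PySem.Dict String (List Int) := fun p =>
    (PySem.List.enumerate inputStrings).foldl
      (fun (g : PySem.Dict String (List Int)) is =>
        if g.contains (String.singleton (PySem.List.pyGetD is.2.toList p ' ')) then
          g.modify (String.singleton (PySem.List.pyGetD is.2.toList p ' ')) [] (· ++ [is.1])
        else g)
      (alphabet.toList.foldl (fun d c => d.insert (String.singleton c) []) PySem.Dict.empty)
  let letterPositionTable : PySem.Dict Int (PySem.Dict String (List Int)) :=
    (PySem.List.pyRange 0 (PySem.Str.len (PySem.List.pyGetD inputStrings 0 "")) 1).foldl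
      (fun d p => d.insert p (column p)) PySem.Dict.empty
  let letterFreqTable : PySem.Dict Int (PySem.Dict String Int) :=
    PySem.Dict.mk (letterPositionTable.items.map
      (fun q => (q.1, PySem.Dict.mk (q.2.items.map (fun r => (r.1, PySem.List.len r.2))))))
  (letterFreqTable.items.map (fun q => (q.1, q.2.items)), letterPositionTable.items.map (fun q => (q.1, q.2.items)))

-- ===== PRECONDITION & SPEC =====
-- Pre_ excludes the empty string list and lists containing a string shorter than the first:
-- there A raises IndexError — except when the alphabet is empty, where A's per-letter loop never
-- indexes the strings and returns empty tables, while B's single pass over the strings still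
-- indexes them and raises IndexError.
def Pre_calculateLetterFreq (inputStrings : List String) (alphabet : String) : Prop :=
  inputStrings ≠ [] ∧ ∀ s ∈ inputStrings, PySem.Str.len (inputStrings.headD "") ≤ PySem.Str.len s
instance (inputStrings : List String) (alphabet : String) : Decidable (Pre_calculateLetterFreq inputStrings alphabet) := by unfold Pre_calculateLetterFreq; infer_instance
def pvWitness_calculateLetterFreq : List String × String := (["ab", "ba", "bb"], "ab")

def Spec_calculateLetterFreq (inputStrings : List String) (alphabet : String) (out : (List (Int × List (String × Int))) × (List (Int × List (String × List Int)))) : Prop := out = calculateLetterFreq_alt inputStrings alphabet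
instance (inputStrings : List String) (alphabet : String) (out : (List (Int × List (String × Int))) × (List (Int × List (String × List Int)))) : Decidable (Spec_calculateLetterFreq inputStrings alphabet out) := by unfold Spec_calculateLetterFreq; infer_instance

-- ===== CLAIM (what is proved, stated in full; the proofs are below) =====
def Claim_equal_calculateLetterFreq : Prop := ∀ (inputStrings : List String) (alphabet : String), Dom_calculateLetterFreq inputStrings alphabet → Pre_calculateLetterFreq inputStrings alphabet → Spec_calculateLetterFreq inputStrings alphabet (calculateLetterFreq inputStrings alphabet)

-- ===== LEMMAS AND PROOFS =====

-- single-character Python strings are equal iff their characters are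
theorem pvKeyBeq (a b : Char) : ((String.singleton a) == (String.singleton b)) = (a == b) := by
  rcases eq_or_ne a b with h | h
  · simp [h]
  · have hs : String.singleton a ≠ String.singleton b := fun hc =>
      h (by have := congrArg String.toList hc; simpa using this)
    simp [h, hs]

-- modify right after insert at the same key is a single insert
theorem pvModifyInsert {ν : Type} (d : PySem.Dict String ν) (k : String) (v : ν) (d0 : ν) (f : ν → ν) :
    (d.insert k v).modify k d0 f = d.insert k (f v) := by
  rw [PySem.Dict.modify, PySem.Dict.getD_insert_self, PySem.Dict.insert_insert_self]

-- A's innermost loop over all string indices, for one letter c, acting on both tables at once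
theorem pvAStep (mm : Int → Char) (c : Char) (js : List Int)
    (f : PySem.Dict String Int) (ix : PySem.Dict String (List Int)) (vF : Int) (vI : List Int) :
    js.foldl
      (fun (t : PySem.Dict String Int × PySem.Dict String (List Int)) j =>
        if mm j == c then (t.1.modify (String.singleton c) 0 (· + 1), t.2.modify (String.singleton c) [] (· ++ [j])) else t)
      (f.insert (String.singleton c) vF, ix.insert (String.singleton c) vI)
    = (f.insert (String.singleton c) (vF + (js.countP (fun j => mm j == c) : Int)),
       ix.insert (String.singleton c) (vI ++ js.filter (fun j => mm j == c))) := by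
  induction js generalizing vF vI with
  | nil => simp
  | cons j tl ih =>
    by_cases h : (mm j == c) = true
    · simp only [List.foldl_cons, if_pos h, pvModifyInsert]
      rw [ih]
      refine Prod.ext ?_ ?_
      · show f.insert _ _ = f.insert _ _
        congr 1
        simp [h]
        ring
      · show ix.insert _ _ = ix.insert _ _
        congr 1
        simp [h]
    · simp only [List.foldl_cons, if_neg h]
      rw [ih]
      rw [List.countP_cons, List.filter_cons]
      simp [h]

-- A's per-position loop over the alphabet yields, for each letter, its final count and index list
theorem pvAInner (mm : Int → Char) (js : List Int) (cs : List Char)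
    (f : PySem.Dict String Int) (ix : PySem.Dict String (List Int)) :
    cs.foldl
      (fun (t : PySem.Dict String Int × PySem.Dict String (List Int)) c =>
        js.foldl
          (fun (t : PySem.Dict String Int × PySem.Dict String (List Int)) j =>
            if mm j == c then (t.1.modify (String.singleton c) 0 (· + 1), t.2.modify (String.singleton c) [] (· ++ [j])) else t)
          (t.1.insert (String.singleton c) 0, t.2.insert (String.singleton c) []))
      (f, ix)
    = (cs.foldl (fun d c => d.insert (String.singleton c) ((js.countP (fun j => mm j == c) : Int))) f,
       cs.foldl (fun d c => d.insert (String.singleton c) (js.filter (fun j => mm j == c))) ix) := by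
  induction cs generalizing f ix with
  | nil => rfl
  | cons c tl ih =>
    simp only [List.foldl_cons]
    rw [pvAStep]
    simp only [zero_add, List.nil_append]
    exact ih _ _

-- mapping the values of a dict right after one insert = the insert with the mapped value
theorem pvMapInsertOne {κ ν μ : Type} [BEq κ] [LawfulBEq κ] (g : κ → ν → μ) (k : κ) (v0 : ν) (f : PySem.Dict κ ν) :
    PySem.Dict.mk ((f.insert k v0).items.map (fun q => (q.1, g q.1 q.2)))
    = (PySem.Dict.mk (f.items.map (fun q => (q.1, g q.1 q.2)))).insert k (g k v0) := by
  have hc : (PySem.Dict.mk (f.items.map (fun q => (q.1, g q.1 q.2)))).contains k = f.contains k := by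
    simp [PySem.Dict.contains, List.any_map, Function.comp_def]
  by_cases h : f.contains k = true
  · apply PySem.Dict.ext
    rw [PySem.Dict.items_insert_of_contains _ _ h,
        PySem.Dict.items_insert_of_contains _ _ (hc.trans h)]
    simp only [List.map_map]
    apply List.map_congr_left
    intro p _
    by_cases hpk : (p.1 == k) = true
    · simp [eq_of_beq hpk]
    · have hne : p.1 ≠ k := by simpa using hpk
      simp [hne]
  · apply PySem.Dict.ext
    rw [PySem.Dict.items_insert_of_not_contains _ _ (hc.trans (Bool.eq_false_iff.mpr h)),
        PySem.Dict.items_insert_of_not_contains _ _ (Bool.eq_false_iff.mpr h)]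
    simp only [List.map_append, List.map_cons, List.map_nil]

-- mapping the values of a dict built by an insert loop = the insert loop with mapped values
theorem pvMapInsert {κ ν μ α : Type} [BEq κ] [LawfulBEq κ] (g : κ → ν → μ) (key : α → κ) (v0 : α → ν)
    (cs : List α) (f : PySem.Dict κ ν) :
    PySem.Dict.mk ((cs.foldl (fun d c => d.insert (key c) (v0 c)) f).items.map (fun q => (q.1, g q.1 q.2)))
    = cs.foldl (fun d c => d.insert (key c) (g (key c) (v0 c))) (PySem.Dict.mk (f.items.map (fun q => (q.1, g q.1 q.2)))) := by
  induction cs generalizing f with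
  | nil => rfl
  | cons c tl ih =>
    simp only [List.foldl_cons]
    rw [ih, pvMapInsertOne]

-- B's single pass over the strings appends each index to the list of its letter, if present
theorem pvBPass (mm : Int → Char) (js : List Int)
    (ix : PySem.Dict String (List Int)) (hnd : ix.keys.Nodup) :
    js.foldl
      (fun (g : PySem.Dict String (List Int)) j =>
        if g.contains (String.singleton (mm j)) then
          g.modify (String.singleton (mm j)) [] (· ++ [j])
        else g)
      ix
    = PySem.Dict.mk (ix.items.map (fun q => (q.1, q.2 ++ js.filter (fun j => (String.singleton (mm j)) == q.1)))) := by
  induction js generalizing ix with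
  | nil => simp
  | cons j tl ih =>
    by_cases h : ix.contains (String.singleton (mm j)) = true
    · have hm : ix.modify (String.singleton (mm j)) [] (· ++ [j])
          = ix.insert (String.singleton (mm j)) (ix.getD (String.singleton (mm j)) [] ++ [j]) := rfl
      have hk : (ix.insert (String.singleton (mm j)) (ix.getD (String.singleton (mm j)) [] ++ [j])).keys = ix.keys :=
        PySem.Dict.keys_insert_of_contains _ _ h
      simp only [List.foldl_cons, if_pos h]
      rw [ih _ (by rw [hm, hk]; exact hnd)]
      apply PySem.Dict.ext
      show ((ix.insert _ _).items.map _) = (ix.items.map _)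
      rw [hm] at *
      rw [PySem.Dict.items_insert_of_contains _ _ h, List.map_map]
      apply List.map_congr_left
      intro p hp
      by_cases hpk : (p.1 == String.singleton (mm j)) = true
      · have hp1 : p.1 = String.singleton (mm j) := eq_of_beq hpk
        have hv : ix.getD (String.singleton (mm j)) [] = p.2 := by
          rw [← hp1]; exact PySem.Dict.getD_of_mem_items ix (by simpa using hp) hnd []
        simp only [Function.comp_def, if_pos hpk, List.filter_cons]
        simp [← hp1]
        rw [hp1, hv]
      · simp only [Function.comp_def, if_neg hpk, List.filter_cons]
        have : ((String.singleton (mm j) == p.1)) = false := by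
          rcases eq_or_ne (String.singleton (mm j)) p.1 with he | he
          · exact absurd (by simp [he.symm]) hpk
          · simpa using he
        simp [this]
    · have hnm : String.singleton (mm j) ∉ ix.keys := by
        intro hm; exact h ((PySem.Dict.contains_iff_mem_keys _ _).mpr hm)
      simp only [List.foldl_cons, if_neg h]
      rw [ih _ hnd]
      apply PySem.Dict.ext
      show (ix.items.map _) = (ix.items.map _)
      apply List.map_congr_left
      intro p hp
      have hne : (String.singleton (mm j) == p.1) = false := by
        have : p.1 ∈ ix.keys := PySem.Dict.mem_keys_of_mem_items _ hp
        rcases eq_or_ne (String.singleton (mm j)) p.1 with he | he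
        · exact absurd (he ▸ this) hnm
        · simpa using he
      simp [hne]

-- B's per-position grouping pass equals A's per-letter index table
theorem pvColEq (inputStrings : List String) (alphabet : String) (p : Int) :
    (PySem.List.enumerate inputStrings).foldl
      (fun (g : PySem.Dict String (List Int)) is =>
        if g.contains (String.singleton (PySem.List.pyGetD is.2.toList p ' ')) then
          g.modify (String.singleton (PySem.List.pyGetD is.2.toList p ' ')) [] (· ++ [is.1])
        else g)
      (alphabet.toList.foldl (fun d c => d.insert (String.singleton c) []) PySem.Dict.empty)
    = alphabet.toList.foldl
        (fun d c => d.insert (String.singleton c)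
          ((PySem.List.pyRange 0 (PySem.List.len inputStrings) 1).filter
            (fun j => PySem.List.pyGetD (PySem.List.pyGetD inputStrings j "").toList p ' ' == c)))
        PySem.Dict.empty := by
  have hnd : (alphabet.toList.foldl (fun d c => d.insert (String.singleton c) ([] : List Int)) PySem.Dict.empty).keys.Nodup :=
    PySem.Dict.nodup_keys_foldl_insert_key alphabet.toList String.singleton (fun _ _ => ([] : List Int)) _ PySem.Dict.nodup_keys_empty
  rw [PySem.List.enumerate_eq_map_pyRange inputStrings "", List.foldl_map]
  rw [pvBPass (fun j => PySem.List.pyGetD (PySem.List.pyGetD inputStrings j "").toList p ' ')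
      (PySem.List.pyRange 0 (PySem.List.len inputStrings) 1) _ hnd]
  rw [pvMapInsert (fun k v => v ++ ((PySem.List.pyRange 0 (PySem.List.len inputStrings) 1).filter
        (fun j => (String.singleton (PySem.List.pyGetD (PySem.List.pyGetD inputStrings j "").toList p ' ')) == k)))
      String.singleton (fun _ => ([] : List Int))]
  congr 1
  funext d c
  rw [List.nil_append]
  congr 1
  apply List.filter_congr
  intro j _
  rw [pvKeyBeq]

-- lengths of the grouped index lists are A's counts
theorem pvLenEq (inputStrings : List String) (alphabet : String) (p : Int) :
    PySem.Dict.mk ((alphabet.toList.foldl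
        (fun d c => d.insert (String.singleton c)
          ((PySem.List.pyRange 0 (PySem.List.len inputStrings) 1).filter
            (fun j => PySem.List.pyGetD (PySem.List.pyGetD inputStrings j "").toList p ' ' == c)))
        PySem.Dict.empty).items.map (fun r => (r.1, PySem.List.len r.2)))
    = alphabet.toList.foldl
        (fun d c => d.insert (String.singleton c)
          (((PySem.List.pyRange 0 (PySem.List.len inputStrings) 1).countP
            (fun j => PySem.List.pyGetD (PySem.List.pyGetD inputStrings j "").toList p ' ' == c) : Int)))
        PySem.Dict.empty := by
  rw [pvMapInsert (fun _ v => PySem.List.len v) String.singleton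
      (fun c => ((PySem.List.pyRange 0 (PySem.List.len inputStrings) 1).filter
        (fun j => PySem.List.pyGetD (PySem.List.pyGetD inputStrings j "").toList p ' ' == c)))]
  congr 1
  funext d c
  congr 1
  simp [PySem.List.len, List.countP_eq_length_filter]

-- a pair-valued insert fold splits into its two component folds
theorem pvFoldPair {ν1 ν2 : Type} (xs : List Int) (F : Int → ν1) (I : Int → ν2)
    (a : PySem.Dict Int ν1) (b : PySem.Dict Int ν2) :
    xs.foldl (fun (t : PySem.Dict Int ν1 × PySem.Dict Int ν2) p => (t.1.insert p (F p), t.2.insert p (I p))) (a, b)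
    = (xs.foldl (fun d p => d.insert p (F p)) a, xs.foldl (fun d p => d.insert p (I p)) b) := by
  induction xs generalizing a b with
  | nil => rfl
  | cons x tl ih => simp only [List.foldl_cons]; exact ih _ _

-- ===== VERDICT (by name: the statement is the Claim_ definition above) =====
theorem calculateLetterFreq_spec : Claim_equal_calculateLetterFreq := by
  intro inputStrings alphabet _ _
  unfold Spec_calculateLetterFreq calculateLetterFreq calculateLetterFreq_alt
  simp only [pvAInner, pvColEq]
  rw [pvFoldPair]
  refine Prod.ext ?_ rfl
  have h2 := congrArg PySem.Dict.items (pvMapInsert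
    (g := fun (_ : Int) (v : PySem.Dict String (List Int)) =>
      PySem.Dict.mk (v.items.map (fun r => (r.1, PySem.List.len r.2))))
    (key := fun (p : Int) => p)
    (v0 := fun p => alphabet.toList.foldl (fun d c => d.insert (String.singleton c)
        ((PySem.List.pyRange 0 (PySem.List.len inputStrings) 1).filter
          (fun j => PySem.List.pyGetD (PySem.List.pyGetD inputStrings j "").toList p ' ' == c)))
        PySem.Dict.empty)
    (cs := PySem.List.pyRange 0 (PySem.Str.len (PySem.List.pyGetD inputStrings 0 "")) 1)
    (f := PySem.Dict.empty))
  simp only [pvLenEq] at h2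
  rw [h2]
  rfl
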